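-- pv_equiv track=rewrite | github.com/wmkirby1/CS-VQE | legacy/fermions/yaferp/general/sparseLinalg.py | pauliStringToListsIndices
-- ===== SOURCE A (Python) =====
-- def innermostFactor(pauli):
--     if pauli == 0:
--         return [(0,0),(1,1)], [], [], []
--     elif pauli == 1:
--         return [(0,1),(1,0)], [], [], []
--     elif pauli == 2:
--         return [],[(1,0)],[],[(0,1)]
--     elif pauli == 3:
--         return [(0,0)],[],[(1,1)],[]
--
-- def pauliI(bitSetter,set1,setI,setNeg,setNegI):
--     resSet1 = set1 + [(x[0] + bitSetter,x[1] + bitSetter) for x in set1]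
--     resSetI = setI + [(x[0] + bitSetter, x[1] + bitSetter) for x in setI]
--     resSetNeg = setNeg + [(x[0] + bitSetter, x[1] + bitSetter) for x in setNeg]
--     resSetNegI = setNegI + [(x[0] + bitSetter, x[1] + bitSetter) for x in setNegI]
--     return resSet1,resSetI,resSetNeg,resSetNegI
--
-- def pauliX(bitSetter,set1,setI,setNeg,setNegI):
--     resSet1 = [(x[0] + bitSetter, x[1]) for x in set1] + [(x[0],x[1] + bitSetter) for x in set1]
--     resSetI = [(x[0] + bitSetter, x[1]) for x in setI] + [(x[0],x[1] + bitSetter) for x in setI]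
--     resSetNeg = [(x[0] + bitSetter, x[1]) for x in setNeg] + [(x[0], x[1] + bitSetter) for x in setNeg]
--     resSetNegI = [(x[0] + bitSetter, x[1]) for x in setNegI] + [(x[0], x[1] + bitSetter) for x in setNegI]
--     return resSet1,resSetI,resSetNeg,resSetNegI
--
-- def pauliY(bitSetter,set1,setI,setNeg,setNegI):
--     resSet1 = [(x[0],x[1] + bitSetter) for x in setI] + [(x[0] + bitSetter,x[1]) for x in setNegI]
--     resSetI = [(x[0], x[1] + bitSetter) for x in setNeg] + [(x[0] + bitSetter, x[1]) for x in set1]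
--     resSetNeg = [(x[0], x[1] + bitSetter) for x in setNegI] + [(x[0] + bitSetter, x[1]) for x in setI]
--     resSetNegI = [(x[0], x[1] + bitSetter) for x in set1] + [(x[0] + bitSetter, x[1]) for x in setNeg]
--     return resSet1,resSetI,resSetNeg,resSetNegI
--
-- def pauliZ(bitSetter,set1,setI,setNeg,setNegI):
--     resSet1 = set1 + [(x[0] + bitSetter,x[1] + bitSetter) for x in setNeg]
--     resSetI = setI + [(x[0] + bitSetter,x[1] + bitSetter) for x in setNegI]
--     resSetNeg = setNeg + [(x[0] + bitSetter,x[1] + bitSetter) for x in set1]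
--     resSetNegI = setNegI + [(x[0] + bitSetter, x[1] + bitSetter) for x in setI]
--     return resSet1,resSetI,resSetNeg,resSetNegI
--
-- def pauliStringToListsIndices(pauliString):
--     thisPauli = pauliString[0]
--     if len(pauliString) == 1:
--         return innermostFactor(thisPauli)
--     pauliStringWithoutMe = pauliString[1:]
--     set1,setI,setNeg,setNegI = pauliStringToListsIndices(pauliStringWithoutMe)
--     bitSetter = 2 ** len(pauliStringWithoutMe)
--     if thisPauli == 0:
--         return pauliI(bitSetter,set1,setI,setNeg,setNegI)
--     elif thisPauli == 1:
--         return pauliX(bitSetter,set1,setI,setNeg,setNegI)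
--     elif thisPauli == 2:
--         return pauliY(bitSetter,set1,setI,setNeg,setNegI)
--     else:
--         return pauliZ(bitSetter,set1,setI,setNeg,setNegI)
-- ===== SOURCE B (Python) =====
-- def pauliStringToListsIndices(pauliString):
--     # Single flat list of (row, col, phase) triples, phase counted in quarter
--     # turns of i (0 = +1, 1 = +i, 2 = -1, 3 = -i); fold the Pauli factors from
--     # the innermost (last) outwards, then partition by phase mod 4 at the end.
--     p = pauliString[-1]
--     if p == 0:
--         entries = [(0, 0, 0), (1, 1, 0)]
--     elif p == 1:
--         entries = [(0, 1, 0), (1, 0, 0)]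
--     elif p == 2:
--         entries = [(1, 0, 1), (0, 1, 3)]
--     elif p == 3:
--         entries = [(0, 0, 0), (1, 1, 2)]
--     else:
--         raise ValueError("innermost Pauli code must be 0..3")
--     n = 1
--     for q in reversed(pauliString[:-1]):
--         b = 2 ** n
--         if q == 0:
--             entries = entries + [(r + b, c + b, ph) for (r, c, ph) in entries]
--         elif q == 1:
--             entries = [(r + b, c, ph) for (r, c, ph) in entries] \
--                     + [(r, c + b, ph) for (r, c, ph) in entries]
--         elif q == 2:
--             entries = [(r, c + b, ph + 3) for (r, c, ph) in entries] \
--                     + [(r + b, c, ph + 1) for (r, c, ph) in entries]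
--         else:
--             entries = entries + [(r + b, c + b, ph + 2) for (r, c, ph) in entries]
--         n += 1
--     return ([(r, c) for (r, c, ph) in entries if ph % 4 == 0],
--             [(r, c) for (r, c, ph) in entries if ph % 4 == 1],
--             [(r, c) for (r, c, ph) in entries if ph % 4 == 2],
--             [(r, c) for (r, c, ph) in entries if ph % 4 == 3])
-- ===== Notes on version B (the rewrite author's own statement) =====
-- stated objective: alternative
-- what changed: Replaces the head-recursion over four separate coefficient lists with an iterative fold over a single flat list of (row, col, phase) triples (phase = power of i), partitioning by phase mod 4 only once at the end.
-- outside the precondition, e.g. on pauliStringToListsIndices([5]): A returns None, B raises ValueError; on pauliStringToListsIndices([]): A raises IndexError, B raises IndexError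
import Mathlib
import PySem

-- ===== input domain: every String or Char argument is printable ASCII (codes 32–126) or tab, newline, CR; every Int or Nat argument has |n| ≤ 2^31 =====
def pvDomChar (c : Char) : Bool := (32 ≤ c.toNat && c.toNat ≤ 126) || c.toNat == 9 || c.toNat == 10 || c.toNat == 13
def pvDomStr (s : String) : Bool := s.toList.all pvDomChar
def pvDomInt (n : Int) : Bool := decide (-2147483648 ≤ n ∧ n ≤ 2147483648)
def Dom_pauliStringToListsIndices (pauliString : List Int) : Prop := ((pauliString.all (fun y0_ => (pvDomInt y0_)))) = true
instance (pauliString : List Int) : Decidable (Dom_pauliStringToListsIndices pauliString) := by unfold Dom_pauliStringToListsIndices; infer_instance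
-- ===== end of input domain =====

-- B folds a single flat list of (row, col, phase) triples (phase = power of i) and partitions by phase mod 4 once at the end, instead of A's head-recursion over four separate lists (alternative decomposition, same cost).


-- ===== PORT A =====
-- Python's innermostFactor returns None when pauli is not in {0,1,2,3}; those inputs are excluded by Pre_, the else branch here is arbitrary.
def innermostFactor (pauli : Int) : (List (Int × Int)) × (List (Int × Int)) × (List (Int × Int)) × (List (Int × Int)) :=
  if pauli = 0 then ([(0,0),(1,1)], [], [], [])
  else if pauli = 1 then ([(0,1),(1,0)], [], [], [])
  else if pauli = 2 then ([], [(1,0)], [], [(0,1)])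
  else if pauli = 3 then ([(0,0)], [], [(1,1)], [])
  else ([], [], [], [])

def pauliI (b : Int) (s1 sI sN sNI : List (Int × Int)) :
    (List (Int × Int)) × (List (Int × Int)) × (List (Int × Int)) × (List (Int × Int)) :=
  (s1 ++ s1.map (fun x => (x.1 + b, x.2 + b)),
   sI ++ sI.map (fun x => (x.1 + b, x.2 + b)),
   sN ++ sN.map (fun x => (x.1 + b, x.2 + b)),
   sNI ++ sNI.map (fun x => (x.1 + b, x.2 + b)))

def pauliX (b : Int) (s1 sI sN sNI : List (Int × Int)) :
    (List (Int × Int)) × (List (Int × Int)) × (List (Int × Int)) × (List (Int × Int)) :=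
  (s1.map (fun x => (x.1 + b, x.2)) ++ s1.map (fun x => (x.1, x.2 + b)),
   sI.map (fun x => (x.1 + b, x.2)) ++ sI.map (fun x => (x.1, x.2 + b)),
   sN.map (fun x => (x.1 + b, x.2)) ++ sN.map (fun x => (x.1, x.2 + b)),
   sNI.map (fun x => (x.1 + b, x.2)) ++ sNI.map (fun x => (x.1, x.2 + b)))

def pauliY (b : Int) (s1 sI sN sNI : List (Int × Int)) :
    (List (Int × Int)) × (List (Int × Int)) × (List (Int × Int)) × (List (Int × Int)) :=
  (sI.map (fun x => (x.1, x.2 + b)) ++ sNI.map (fun x => (x.1 + b, x.2)),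
   sN.map (fun x => (x.1, x.2 + b)) ++ s1.map (fun x => (x.1 + b, x.2)),
   sNI.map (fun x => (x.1, x.2 + b)) ++ sI.map (fun x => (x.1 + b, x.2)),
   s1.map (fun x => (x.1, x.2 + b)) ++ sN.map (fun x => (x.1 + b, x.2)))

def pauliZ (b : Int) (s1 sI sN sNI : List (Int × Int)) :
    (List (Int × Int)) × (List (Int × Int)) × (List (Int × Int)) × (List (Int × Int)) :=
  (s1 ++ sN.map (fun x => (x.1 + b, x.2 + b)),
   sI ++ sNI.map (fun x => (x.1 + b, x.2 + b)),
   sN ++ s1.map (fun x => (x.1 + b, x.2 + b)),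
   sNI ++ sI.map (fun x => (x.1 + b, x.2 + b)))

def pauliStringToListsIndices (pauliString : List Int) :
    (List (Int × Int)) × (List (Int × Int)) × (List (Int × Int)) × (List (Int × Int)) :=
  match pauliString with
  | [] => ([], [], [], [])
  | thisPauli :: rest =>
    if rest = [] then innermostFactor thisPauli
    else
      let r := pauliStringToListsIndices rest
      let bitSetter : Int := 2 ^ rest.length
      if thisPauli = 0 then pauliI bitSetter r.1 r.2.1 r.2.2.1 r.2.2.2
      else if thisPauli = 1 then pauliX bitSetter r.1 r.2.1 r.2.2.1 r.2.2.2
      else if thisPauli = 2 then pauliY bitSetter r.1 r.2.1 r.2.2.1 r.2.2.2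
      else pauliZ bitSetter r.1 r.2.1 r.2.2.1 r.2.2.2

-- ===== PORT B =====
-- Source B's innermost entries: flat triples (row, col, phase); Python raises ValueError
-- when the last code is not in {0,1,2,3} (excluded by Pre_), else branch arbitrary.
def pvInit (p : Int) : List (Int × Int × Int) :=
  if p = 0 then [(0,0,0),(1,1,0)]
  else if p = 1 then [(0,1,0),(1,0,0)]
  else if p = 2 then [(1,0,1),(0,1,3)]
  else if p = 3 then [(0,0,0),(1,1,2)]
  else []

def pvStepB (n : Nat) (q : Int) (es : List (Int × Int × Int)) : List (Int × Int × Int) :=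
  let b : Int := 2 ^ n
  if q = 0 then es ++ es.map (fun e => (e.1 + b, e.2.1 + b, e.2.2))
  else if q = 1 then es.map (fun e => (e.1 + b, e.2.1, e.2.2)) ++ es.map (fun e => (e.1, e.2.1 + b, e.2.2))
  else if q = 2 then es.map (fun e => (e.1, e.2.1 + b, e.2.2 + 3)) ++ es.map (fun e => (e.1 + b, e.2.1, e.2.2 + 1))
  else es ++ es.map (fun e => (e.1 + b, e.2.1 + b, e.2.2 + 2))

def pvFilt (k : Int) (es : List (Int × Int × Int)) : List (Int × Int) :=
  (es.filter (fun e => PySem.Int.mod e.2.2 4 == k)).map (fun e => (e.1, e.2.1))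

def pauliStringToListsIndices_alt (pauliString : List Int) :
    (List (Int × Int)) × (List (Int × Int)) × (List (Int × Int)) × (List (Int × Int)) :=
  match pauliString.reverse with
  | [] => ([], [], [], [])
  | lastEl :: prefRev =>
    let E := (prefRev.foldl (fun acc q => (pvStepB acc.2 q acc.1, acc.2 + 1)) (pvInit lastEl, 1)).1
    (pvFilt 0 E, pvFilt 1 E, pvFilt 2 E, pvFilt 3 E)

-- ===== PRECONDITION & SPEC =====
-- Pre_ excludes the empty list (A raises IndexError) and a last element outside {0,1,2,3}
-- (there A's innermostFactor returns None, not a value of the declared type; B raises ValueError).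
def Pre_pauliStringToListsIndices (pauliString : List Int) : Prop :=
  pauliString ≠ [] ∧ pauliString.getLast?.getD 0 ∈ ([0, 1, 2, 3] : List Int)
instance (pauliString : List Int) : Decidable (Pre_pauliStringToListsIndices pauliString) := by
  unfold Pre_pauliStringToListsIndices; infer_instance
def pvWitness_pauliStringToListsIndices : List Int := [1, 2, 0, 3]

def Spec_pauliStringToListsIndices (pauliString : List Int) (out : (List (Int × Int)) × (List (Int × Int)) × (List (Int × Int)) × (List (Int × Int))) : Prop := out = pauliStringToListsIndices_alt pauliString
instance (pauliString : List Int) (out : (List (Int × Int)) × (List (Int × Int)) × (List (Int × Int)) × (List (Int × Int))) : Decidable (Spec_pauliStringToListsIndices pauliString out) := by unfold Spec_pauliStringToListsIndices; infer_instance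

-- ===== CLAIM (what is proved, stated in full; the proofs are below) =====
def Claim_equal_pauliStringToListsIndices : Prop := ∀ (pauliString : List Int), Dom_pauliStringToListsIndices pauliString → Pre_pauliStringToListsIndices pauliString → Spec_pauliStringToListsIndices pauliString (pauliStringToListsIndices pauliString)

-- ===== LEMMAS AND PROOFS =====

theorem pvFilt_append (k : Int) (a b : List (Int × Int × Int)) :
    pvFilt k (a ++ b) = pvFilt k a ++ pvFilt k b := by
  simp [pvFilt]

theorem pvFilt_map (k k' c : Int) (f g : Int → Int)
    (h : ∀ ph : Int, (ph + c) % 4 = k ↔ ph % 4 = k')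
    (es : List (Int × Int × Int)) :
    pvFilt k (es.map (fun e => (f e.1, g e.2.1, e.2.2 + c)))
      = (pvFilt k' es).map (fun x => (f x.1, g x.2)) := by
  unfold pvFilt
  rw [List.filter_map, List.map_map, List.map_map]
  congr 1
  apply List.filter_congr
  intro e _
  simp only [Function.comp_apply]
  rw [PySem.Int.mod_eq_emod_of_pos (by norm_num), PySem.Int.mod_eq_emod_of_pos (by norm_num)]
  exact decide_eq_decide.mpr (h e.2.2)

theorem pvFilt_map0 (k : Int) (f g : Int → Int) (es : List (Int × Int × Int)) :
    pvFilt k (es.map (fun e => (f e.1, g e.2.1, e.2.2)))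
      = (pvFilt k es).map (fun x => (f x.1, g x.2)) := by
  unfold pvFilt
  rw [List.filter_map, List.map_map, List.map_map]
  rfl

-- one B step, partitioned, equals A's dispatch on the partitions
theorem pvFilt_mapBoth (k b : Int) (es : List (Int × Int × Int)) :
    pvFilt k (es.map (fun e => (e.1 + b, e.2.1 + b, e.2.2))) = (pvFilt k es).map (fun x => (x.1 + b, x.2 + b)) :=
  pvFilt_map0 k (· + b) (· + b) es

theorem pvFilt_mapRow (k b : Int) (es : List (Int × Int × Int)) :
    pvFilt k (es.map (fun e => (e.1 + b, e.2.1, e.2.2))) = (pvFilt k es).map (fun x => (x.1 + b, x.2)) :=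
  pvFilt_map0 k (· + b) (fun a => a) es

theorem pvFilt_mapCol (k b : Int) (es : List (Int × Int × Int)) :
    pvFilt k (es.map (fun e => (e.1, e.2.1 + b, e.2.2))) = (pvFilt k es).map (fun x => (x.1, x.2 + b)) :=
  pvFilt_map0 k (fun a => a) (· + b) es

theorem pvFilt_mapBothP (k k' c : Int) (h : ∀ ph : Int, (ph + c) % 4 = k ↔ ph % 4 = k')
    (b : Int) (es : List (Int × Int × Int)) :
    pvFilt k (es.map (fun e => (e.1 + b, e.2.1 + b, e.2.2 + c))) = (pvFilt k' es).map (fun x => (x.1 + b, x.2 + b)) :=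
  pvFilt_map k k' c (· + b) (· + b) h es

theorem pvFilt_mapRowP (k k' c : Int) (h : ∀ ph : Int, (ph + c) % 4 = k ↔ ph % 4 = k')
    (b : Int) (es : List (Int × Int × Int)) :
    pvFilt k (es.map (fun e => (e.1 + b, e.2.1, e.2.2 + c))) = (pvFilt k' es).map (fun x => (x.1 + b, x.2)) :=
  pvFilt_map k k' c (· + b) (fun a => a) h es

theorem pvFilt_mapColP (k k' c : Int) (h : ∀ ph : Int, (ph + c) % 4 = k ↔ ph % 4 = k')
    (b : Int) (es : List (Int × Int × Int)) :
    pvFilt k (es.map (fun e => (e.1, e.2.1 + b, e.2.2 + c))) = (pvFilt k' es).map (fun x => (x.1, x.2 + b)) :=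
  pvFilt_map k k' c (fun a => a) (· + b) h es

-- one B step, partitioned, equals A's dispatch on the partitions
theorem pvStep_filt (n : Nat) (p : Int) (E : List (Int × Int × Int)) :
    (pvFilt 0 (pvStepB n p E), pvFilt 1 (pvStepB n p E), pvFilt 2 (pvStepB n p E), pvFilt 3 (pvStepB n p E))
      = (if p = 0 then pauliI (2 ^ n) (pvFilt 0 E) (pvFilt 1 E) (pvFilt 2 E) (pvFilt 3 E)
         else if p = 1 then pauliX (2 ^ n) (pvFilt 0 E) (pvFilt 1 E) (pvFilt 2 E) (pvFilt 3 E)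
         else if p = 2 then pauliY (2 ^ n) (pvFilt 0 E) (pvFilt 1 E) (pvFilt 2 E) (pvFilt 3 E)
         else pauliZ (2 ^ n) (pvFilt 0 E) (pvFilt 1 E) (pvFilt 2 E) (pvFilt 3 E)) := by
  unfold pvStepB pauliI pauliX pauliY pauliZ
  split_ifs <;>
    simp only [pvFilt_append, pvFilt_mapBoth, pvFilt_mapRow, pvFilt_mapCol,
      pvFilt_mapColP 0 1 3 (by intro ph; omega), pvFilt_mapColP 1 2 3 (by intro ph; omega),
      pvFilt_mapColP 2 3 3 (by intro ph; omega), pvFilt_mapColP 3 0 3 (by intro ph; omega),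
      pvFilt_mapRowP 0 3 1 (by intro ph; omega), pvFilt_mapRowP 1 0 1 (by intro ph; omega),
      pvFilt_mapRowP 2 1 1 (by intro ph; omega), pvFilt_mapRowP 3 2 1 (by intro ph; omega),
      pvFilt_mapBothP 0 2 2 (by intro ph; omega), pvFilt_mapBothP 1 3 2 (by intro ph; omega),
      pvFilt_mapBothP 2 0 2 (by intro ph; omega), pvFilt_mapBothP 3 1 2 (by intro ph; omega)]

theorem pvInit_filt (lastEl : Int) :
    (pvFilt 0 (pvInit lastEl), pvFilt 1 (pvInit lastEl), pvFilt 2 (pvInit lastEl), pvFilt 3 (pvInit lastEl))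
      = innermostFactor lastEl := by
  unfold pvInit innermostFactor
  split_ifs <;> decide

theorem pvFold_eq_A (q : List Int) (lastEl : Int) :
    ∃ E, q.reverse.foldl (fun acc p => (pvStepB acc.2 p acc.1, acc.2 + 1)) (pvInit lastEl, 1)
        = (E, q.length + 1)
      ∧ (pvFilt 0 E, pvFilt 1 E, pvFilt 2 E, pvFilt 3 E)
        = pauliStringToListsIndices (q ++ [lastEl]) := by
  induction q with
  | nil =>
    refine ⟨pvInit lastEl, rfl, ?_⟩
    simpa [pauliStringToListsIndices] using pvInit_filt lastEl
  | cons p q' ih =>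
    obtain ⟨E, hE, hf⟩ := ih
    refine ⟨pvStepB (q'.length + 1) p E, ?_, ?_⟩
    · simp [List.reverse_cons, List.foldl_append, hE]
    · have hne : q' ++ [lastEl] ≠ [] := by simp
      rw [List.cons_append]
      conv_rhs => rw [pauliStringToListsIndices]
      simp only [hne, reduceIte]
      rw [← hf]
      have hlen : (q' ++ [lastEl]).length = q'.length + 1 := by simp
      rw [hlen]
      exact pvStep_filt (q'.length + 1) p E

theorem pauliStringToListsIndices_eq_alt (pauliString : List Int)
    (h : pauliString ≠ []) :
    pauliStringToListsIndices pauliString = pauliStringToListsIndices_alt pauliString := by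
  obtain ⟨q, lastEl, rfl⟩ := (List.eq_nil_or_concat pauliString).resolve_left h
  rw [List.concat_eq_append]
  unfold pauliStringToListsIndices_alt
  rw [List.reverse_append, List.reverse_singleton, List.singleton_append]
  obtain ⟨E, hE, hfilt⟩ := pvFold_eq_A q lastEl
  simp only [hE, hfilt]

-- ===== VERDICT (by name: the statement is the Claim_ definition above) =====
theorem pauliStringToListsIndices_spec : Claim_equal_pauliStringToListsIndices := by
  intro ps _ hpre
  unfold Spec_pauliStringToListsIndices
  exact pauliStringToListsIndices_eq_alt ps hpre.1
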